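-- pv_equiv track=rewrite | github.com/stonedz/poker-6--helper | src/shortdeck_cli/postflop.py | _has_four_to_straight
-- ===== SOURCE A (Python) =====
-- RANK_ORDER = "6789TJQKA"
--
-- RANK_TO_INDEX = {rank: index for index, rank in enumerate(RANK_ORDER)}
--
-- def _straight_high_index(cards: list[str]) -> int | None:
--     indexes = {RANK_TO_INDEX[card[0]] for card in cards}
--     if len(indexes) < 5:
--         return None
--
--     for start in range(0, len(RANK_ORDER) - 4):
--         needed = {start, start + 1, start + 2, start + 3, start + 4}
--         if needed.issubset(indexes):
--             return start + 4
--
--     wheel = {RANK_TO_INDEX["A"], RANK_TO_INDEX["6"], RANK_TO_INDEX["7"], RANK_TO_INDEX["8"], RANK_TO_INDEX["9"]}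
--     if wheel.issubset(indexes):
--         return RANK_TO_INDEX["9"]
--
--     return None
--
-- def _has_straight(cards: list[str]) -> bool:
--     return _straight_high_index(cards) is not None
--
-- def _has_four_to_straight(cards: list[str]) -> bool:
--     if _has_straight(cards):
--         return False
--
--     indexes = {RANK_TO_INDEX[card[0]] for card in cards}
--     for start in range(0, len(RANK_ORDER) - 4):
--         needed = {start, start + 1, start + 2, start + 3, start + 4}
--         if len(needed.intersection(indexes)) == 4:
--             return True
--
--     wheel = {RANK_TO_INDEX["A"], RANK_TO_INDEX["6"], RANK_TO_INDEX["7"], RANK_TO_INDEX["8"], RANK_TO_INDEX["9"]}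
--     if len(wheel.intersection(indexes)) == 4:
--         return True
--
--     return False
-- ===== SOURCE B (Python) =====
-- RANK_ORDER = "6789TJQKA"
--
-- # Different algorithm: no window enumeration.  Map each rank to its index, add a
-- # low ace (-1) when an ace is present, sort the distinct values, and scan the
-- # sorted list once: a straight is five consecutive entries spanning exactly 4,
-- # and a four-to-straight draw is four consecutive entries spanning at most 4
-- # (four distinct ranks fitting in some 5-rank window).
-- def _has_four_to_straight(cards: list[str]) -> bool:
--     vals = sorted({RANK_ORDER.index(card[0]) for card in cards})
--     if vals and vals[-1] == 8:
--         vals = [-1] + vals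
--     straight = any(hi - lo == 4 for lo, hi in zip(vals, vals[4:]))
--     four = any(hi - lo <= 4 for lo, hi in zip(vals, vals[3:]))
--     return four and not straight
-- ===== Notes on version B (the rewrite author's own statement) =====
-- stated objective: alternative
-- what changed: B abandons window enumeration entirely: it sorts the distinct rank indexes (duplicating an ace as -1 for the wheel) and does one scan over the sorted list, detecting a straight as five consecutive entries with span 4 and a four-card draw as four consecutive entries with span at most 4, instead of A's two passes testing set subset/intersection against each of the six fixed 5-rank windows.
import Mathlib
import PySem

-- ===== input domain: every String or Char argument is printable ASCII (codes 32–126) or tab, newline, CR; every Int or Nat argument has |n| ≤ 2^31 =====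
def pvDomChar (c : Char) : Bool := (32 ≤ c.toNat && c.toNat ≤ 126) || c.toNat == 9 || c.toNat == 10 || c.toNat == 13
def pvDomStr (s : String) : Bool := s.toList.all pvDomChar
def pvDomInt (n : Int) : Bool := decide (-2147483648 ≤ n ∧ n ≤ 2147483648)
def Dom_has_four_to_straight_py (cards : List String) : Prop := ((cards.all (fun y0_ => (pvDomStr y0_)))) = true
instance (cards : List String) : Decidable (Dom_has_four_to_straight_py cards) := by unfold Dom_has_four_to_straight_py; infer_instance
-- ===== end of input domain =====

-- B replaces A's six-window subset/intersection scans by sorting the distinct rank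
-- values (ace duplicated as -1) and one span scan over the sorted list (objective: alternative).


-- ===== PORT A =====
-- RANK_TO_INDEX = {rank: index for index, rank in enumerate("6789TJQKA")}
def rankToIndexA : PySem.Dict Char Int :=
  PySem.Dict.ofList [('6', 0), ('7', 1), ('8', 2), ('9', 3), ('T', 4), ('J', 5), ('Q', 6), ('K', 7), ('A', 8)]

-- RANK_TO_INDEX[card[0]], total form via getD 0: exact under Pre_ (card nonempty, first char a rank)
def cardIdxA (card : String) : Int :=
  ((PySem.Str.pyGet? card 0).bind (PySem.Dict.get? rankToIndexA)).getD 0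

-- indexes = {RANK_TO_INDEX[card[0]] for card in cards}
def indexSetA (cards : List String) : PySem.Set Int :=
  PySem.Set.ofList (cards.map cardIdxA)

-- _straight_high_index
def straightHighIndexA (cards : List String) : Option Int :=
  let indexes := indexSetA cards
  if PySem.Set.len indexes < 5 then none
  else
    match (PySem.List.pyRange 0 5).find? (fun start =>
        PySem.Set.issubset (PySem.Set.ofList [start, start + 1, start + 2, start + 3, start + 4]) indexes) with
    | some start => some (start + 4)
    | none =>
        if PySem.Set.issubset (PySem.Set.ofList [8, 0, 1, 2, 3]) indexes then some 3 else none

-- _has_straight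
def hasStraightA (cards : List String) : Bool := (straightHighIndexA cards).isSome

-- _has_four_to_straight
def has_four_to_straight_py (cards : List String) : Bool :=
  if hasStraightA cards then false
  else
    let indexes := indexSetA cards
    if (PySem.List.pyRange 0 5).any (fun start =>
        PySem.Set.len (PySem.Set.inter (PySem.Set.ofList [start, start + 1, start + 2, start + 3, start + 4]) indexes) == 4) then
      true
    else if PySem.Set.len (PySem.Set.inter (PySem.Set.ofList [8, 0, 1, 2, 3]) indexes) == 4 then
      true
    else false

-- ===== PORT B =====
def rankOrderB : List Char := ['6', '7', '8', '9', 'T', 'J', 'Q', 'K', 'A']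

-- RANK_ORDER.index(card[0]), total form via idxOf/headD: exact under Pre_ (card nonempty, first char a rank)
def cardIdxB (card : String) : Int := (rankOrderB.idxOf (card.toList.headD ' ') : Int)

-- the body of B after 'vals = sorted({...})': the -1 prepend and the two span scans
def bodyB (vals0 : List Int) : Bool :=
  -- if vals and vals[-1] == 8: vals = [-1] + vals
  let vals := if !vals0.isEmpty && ((PySem.List.pyGet? vals0 (-1)).getD 0 == 8)
              then (-1) :: vals0 else vals0
  -- straight = any(hi - lo == 4 for lo, hi in zip(vals, vals[4:]))
  let straight := (vals.zip (PySem.List.slice vals (some 4) none)).any (fun p => p.2 - p.1 == 4)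
  -- four = any(hi - lo <= 4 for lo, hi in zip(vals, vals[3:]))
  let four := (vals.zip (PySem.List.slice vals (some 3) none)).any (fun p => decide (p.2 - p.1 ≤ 4))
  four && !straight

def has_four_to_straight_py_alt (cards : List String) : Bool :=
  -- vals = sorted({RANK_ORDER.index(card[0]) for card in cards})
  bodyB (PySem.List.sorted (PySem.Set.ofList (cards.map cardIdxB)) (fun x => x) false)

-- ===== PRECONDITION & SPEC =====
-- Pre_ excludes inputs where A raises: a card that is the empty string (IndexError on card[0])
-- or whose first character is not one of "6789TJQKA" (KeyError in RANK_TO_INDEX).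
def Pre_has_four_to_straight_py (cards : List String) : Prop :=
  (cards.all (fun card => !card.toList.isEmpty && rankOrderB.contains (card.toList.headD ' '))) = true
instance (cards : List String) : Decidable (Pre_has_four_to_straight_py cards) := by
  unfold Pre_has_four_to_straight_py; infer_instance

def pvWitness_has_four_to_straight_py : List String := ["6s", "7h", "8d", "9c"]

def Spec_has_four_to_straight_py (cards : List String) (out : Bool) : Prop := out = has_four_to_straight_py_alt cards
instance (cards : List String) (out : Bool) : Decidable (Spec_has_four_to_straight_py cards out) := by unfold Spec_has_four_to_straight_py; infer_instance

-- ===== CLAIM (what is proved, stated in full; the proofs are below) =====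
def Claim_equal_has_four_to_straight_py : Prop := ∀ (cards : List String), Dom_has_four_to_straight_py cards → Pre_has_four_to_straight_py cards → Spec_has_four_to_straight_py cards (has_four_to_straight_py cards)

-- ===== LEMMAS AND PROOFS =====

-- A's decision as a function of the index set alone (proof helper)
def coreA (indexes : PySem.Set Int) : Bool :=
  if (if PySem.Set.len indexes < 5 then (none : Option Int)
      else
        match (PySem.List.pyRange 0 5).find? (fun start =>
            PySem.Set.issubset (PySem.Set.ofList [start, start + 1, start + 2, start + 3, start + 4]) indexes) with
        | some start => some (start + 4)
        | none =>
            if PySem.Set.issubset (PySem.Set.ofList [8, 0, 1, 2, 3]) indexes then some 3 else none).isSome then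
    false
  else
    if (PySem.List.pyRange 0 5).any (fun start =>
        PySem.Set.len (PySem.Set.inter (PySem.Set.ofList [start, start + 1, start + 2, start + 3, start + 4]) indexes) == 4) then
      true
    else if PySem.Set.len (PySem.Set.inter (PySem.Set.ofList [8, 0, 1, 2, 3]) indexes) == 4 then
      true
    else false

-- mask: a 9-bit canonical encoding of the index set (proof device only)
def maskB (cards : List String) : Nat :=
  cards.foldl (fun m card => m ||| (1 <<< (cardIdxB card).toNat)) 0

-- the canonical strictly increasing index list realised by a 9-bit mask
def canonSet (m : Nat) : PySem.Set Int :=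
  ((List.range 9).filter m.testBit).map Int.ofNat

-- B's decision as a function of the mask alone (proof helper)
def coreB (m : Nat) : Bool :=
  bodyB (canonSet m)

theorem A_eq_coreA (cards : List String) :
    has_four_to_straight_py cards = coreA (indexSetA cards) := by
  unfold has_four_to_straight_py hasStraightA straightHighIndexA coreA
  rfl

theorem cardIdx_bridge (card : String)
    (h : (!card.toList.isEmpty && rankOrderB.contains (card.toList.headD ' ')) = true) :
    cardIdxA card = cardIdxB card ∧ (cardIdxB card).toNat < 9 := by
  obtain ⟨hne, hmem⟩ := Bool.and_eq_true_iff.mp h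
  rcases hl : card.toList with _ | ⟨c, rest⟩
  · simp [hl] at hne
  · have hc : c ∈ rankOrderB := by
      have := List.contains_iff_mem.mp hmem
      simpa [hl] using this
    have hget : PySem.Str.pyGet? card 0 = some c := by
      rw [show (0 : Int) = ((0 : Nat) : Int) by norm_num, PySem.Str.pyGet?_natCast, hl]
      rfl
    have hhead : card.toList.headD ' ' = c := by simp [hl]
    unfold cardIdxA cardIdxB
    rw [hget, hhead]
    simp only [rankOrderB] at hc ⊢
    fin_cases hc <;> decide

theorem testBit_maskB_foldl (cards : List String) (acc : Nat) (i : Nat) :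
    Nat.testBit (cards.foldl (fun m card => m ||| (1 <<< (cardIdxB card).toNat)) acc) i
      = (acc.testBit i || cards.any (fun card => (cardIdxB card).toNat == i)) := by
  induction cards generalizing acc with
  | nil => simp
  | cons a t ih =>
      rw [List.foldl_cons, ih]
      simp only [Nat.testBit_or, Nat.shiftLeft_eq, one_mul, Nat.testBit_two_pow, List.any_cons, Bool.or_assoc]
      have hb : ((cardIdxB a).toNat == i) = decide ((cardIdxB a).toNat = i) := by
        by_cases h : (cardIdxB a).toNat = i <;> simp [h]
      rw [hb]

theorem testBit_maskB (cards : List String) (i : Nat) :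
    Nat.testBit (maskB cards) i = cards.any (fun card => (cardIdxB card).toNat == i) := by
  unfold maskB; rw [testBit_maskB_foldl]; simp

theorem mem_indexSetA (cards : List String) (x : Int) :
    x ∈ indexSetA cards ↔ ∃ card ∈ cards, cardIdxA card = x := by
  unfold indexSetA
  rw [PySem.Set.mem_ofList]
  simp [List.mem_map, eq_comm]

theorem idxB_nonneg (card : String) : 0 ≤ cardIdxB card := by
  unfold cardIdxB; positivity

theorem indexSetA_perm (cards : List String)
    (hpre : Pre_has_four_to_straight_py cards) :
    (indexSetA cards).Perm (canonSet (maskB cards)) := by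
  have hinj : Function.Injective Int.ofNat := fun a b h => Int.ofNat.inj h
  have hnodc : (canonSet (maskB cards)).Nodup :=
    List.Nodup.map hinj (List.Nodup.filter _ List.nodup_range)
  have hnoda : (indexSetA cards).Nodup := PySem.Set.nodup_ofList _
  rw [List.perm_ext_iff_of_nodup hnoda hnodc]
  intro x
  rw [mem_indexSetA]
  unfold canonSet
  simp only [List.mem_map, List.mem_filter, List.mem_range]
  constructor
  · rintro ⟨card, hcard, hidx⟩
    have hb := cardIdx_bridge card (List.all_eq_true.mp hpre card hcard)
    refine ⟨(cardIdxB card).toNat, ⟨hb.2, ?_⟩, ?_⟩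
    · rw [testBit_maskB]
      exact List.any_eq_true.mpr ⟨card, hcard, by simp⟩
    · rw [← hidx, hb.1]
      simp [Int.toNat_of_nonneg (idxB_nonneg card)]
  · rintro ⟨i, ⟨hi, hbit⟩, rfl⟩
    rw [testBit_maskB] at hbit
    obtain ⟨card, hcard, heq⟩ := List.any_eq_true.mp hbit
    have hb := cardIdx_bridge card (List.all_eq_true.mp hpre card hcard)
    refine ⟨card, hcard, ?_⟩
    rw [hb.1]
    simp only [beq_iff_eq] at heq
    rw [← heq]
    simp [Int.toNat_of_nonneg (idxB_nonneg card)]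

theorem coreA_congr (S1 S2 : PySem.Set Int) (hperm : S1.Perm S2) :
    coreA S1 = coreA S2 := by
  have hmem : ∀ x, x ∈ S1 ↔ x ∈ S2 := fun x => hperm.mem_iff
  have hc : ∀ x, S1.contains x = S2.contains x := by
    intro x
    simp only [PySem.Set.contains]
    cases h1 : List.contains S1 x <;> cases h2 : List.contains S2 x <;>
      simp_all [hmem x]
  have hsub : ∀ (L : PySem.Set Int),
      PySem.Set.issubset L S1 = PySem.Set.issubset L S2 := by
    intro L
    simp only [PySem.Set.issubset]
    exact congrArg L.all (funext fun x => hc x)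
  have hint : ∀ (L : PySem.Set Int),
      PySem.Set.inter L S1 = PySem.Set.inter L S2 := by
    intro L
    simp only [PySem.Set.inter]
    exact congrArg L.filter (funext fun x => hc x)
  have hlen : PySem.Set.len S1 = PySem.Set.len S2 := by
    simp only [PySem.Set.len, hperm.length_eq]
  unfold coreA
  simp only [hsub, hint, hlen]

theorem map_cardIdx_eq (cards : List String)
    (hpre : Pre_has_four_to_straight_py cards) :
    cards.map cardIdxB = cards.map cardIdxA := by
  apply List.map_congr_left
  intro card hcard
  exact (cardIdx_bridge card (List.all_eq_true.mp hpre card hcard)).1.symm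

theorem canonSet_pairwise_lt (m : Nat) : (canonSet m).Pairwise (· < ·) := by
  unfold canonSet
  refine List.Pairwise.map Int.ofNat (fun a b h => ?_)
    (List.Pairwise.filter _ (List.pairwise_lt_range))
  exact Int.ofNat_lt.mpr h

theorem B_eq_coreB (cards : List String)
    (hpre : Pre_has_four_to_straight_py cards) :
    has_four_to_straight_py_alt cards = coreB (maskB cards) := by
  unfold has_four_to_straight_py_alt coreB
  congr 1
  rw [map_cardIdx_eq cards hpre]
  have hperm : (canonSet (maskB cards)).Perm (indexSetA cards) :=
    (indexSetA_perm cards hpre).symm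
  exact PySem.List.sorted_eq_of_perm_of_pairwise_lt _ _ (fun x => x) hperm (canonSet_pairwise_lt _)

theorem maskB_lt (cards : List String)
    (hpre : Pre_has_four_to_straight_py cards) : maskB cards < 512 := by
  unfold Pre_has_four_to_straight_py at hpre
  have : ∀ acc : Nat, acc < 2 ^ 9 →
      cards.foldl (fun m card => m ||| (1 <<< (cardIdxB card).toNat)) acc < 2 ^ 9 := by
    induction cards with
    | nil => intro acc h; simpa using h
    | cons a t ih =>
        intro acc hacc
        simp only [List.all_cons, Bool.and_eq_true] at hpre
        have hk : (cardIdxB a).toNat < 9 := (cardIdx_bridge a (by simp only [Bool.and_eq_true]; exact hpre.1)).2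
        have hstep : acc ||| (1 <<< (cardIdxB a).toNat) < 2 ^ 9 := by
          apply Nat.or_lt_two_pow hacc
          rw [Nat.shiftLeft_eq, one_mul]
          exact Nat.pow_lt_pow_right (by norm_num) hk
        simpa using ih hpre.2 _ hstep
  simpa using this 0 (by norm_num)

set_option maxHeartbeats 4000000 in
set_option maxRecDepth 40000 in
theorem coreA_eq_coreB : ∀ m : Nat, m < 512 → coreA (canonSet m) = coreB m := by
  decide

-- ===== VERDICT (by name: the statement is the Claim_ definition above) =====
theorem has_four_to_straight_py_spec : Claim_equal_has_four_to_straight_py := by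
  intro cards _ hpre
  unfold Spec_has_four_to_straight_py
  have hm := maskB_lt cards hpre
  calc has_four_to_straight_py cards
      = coreA (indexSetA cards) := A_eq_coreA cards
    _ = coreA (canonSet (maskB cards)) := coreA_congr _ _ (indexSetA_perm cards hpre)
    _ = coreB (maskB cards) := coreA_eq_coreB _ hm
    _ = has_four_to_straight_py_alt cards := (B_eq_coreB cards hpre).symm
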